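-- pv_equiv track=rewrite | github.com/Bit-Sahil04/paint-magic | core.py | get_tiles
-- ===== SOURCE A (Python) =====
-- def get_tiles(grid, tilex, tiley, size):
--     brush = []
--     for i in range(-(size//2), size//2+1):
--         for j in range(-(size//2), size//2+1):
--             tx = tilex + j
--             ty = tiley + i
--
--             if -1 < ty < len(grid) and -1 < tx < len(grid[0]):
--                 brush.append(grid[ty][tx])
--     return brush
-- ===== SOURCE B (Python) =====
-- def get_tiles(grid, tilex, tiley, size):
--     half = size // 2
--     r0 = max(0, tiley - half)
--     r1 = min(len(grid), tiley + half + 1)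
--     c0 = max(0, tilex - half)
--     c1 = min(len(grid[0]) if grid else 0, tilex + half + 1)
--     if r0 >= r1 or c0 >= c1:
--         return []
--     out = []
--     for row in grid[r0:r1]:
--         out.extend(row[c0:c1])
--     return out
-- ===== Notes on version B (the rewrite author's own statement) =====
-- stated objective: faster
-- what changed: B never indexes or tests a cell: it computes the clamped window once, returns [] for an empty window, and builds the result by list slicing (grid[r0:r1], then row[c0:c1] extended onto the accumulator), whereas A scans the whole size x size brush square with a per-cell bounds test and grid[ty][tx] indexing.
import Mathlib
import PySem

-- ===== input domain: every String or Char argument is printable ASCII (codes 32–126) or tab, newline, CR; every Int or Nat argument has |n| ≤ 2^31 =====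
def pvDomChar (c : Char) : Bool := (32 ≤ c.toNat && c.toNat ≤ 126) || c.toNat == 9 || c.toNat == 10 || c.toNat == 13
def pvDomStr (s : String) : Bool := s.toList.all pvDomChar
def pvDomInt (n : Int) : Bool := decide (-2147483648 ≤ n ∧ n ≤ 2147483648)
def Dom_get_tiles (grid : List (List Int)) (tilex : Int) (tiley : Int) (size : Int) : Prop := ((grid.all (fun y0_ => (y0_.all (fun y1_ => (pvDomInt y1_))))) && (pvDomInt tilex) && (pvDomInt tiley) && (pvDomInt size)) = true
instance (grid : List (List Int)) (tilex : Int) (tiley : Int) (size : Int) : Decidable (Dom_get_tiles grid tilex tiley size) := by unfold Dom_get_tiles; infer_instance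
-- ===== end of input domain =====

-- B computes the clamped brush window once and builds the result by list slicing, skipping A's per-cell bounds test over the whole size x size square (a timing run measured B faster); return values proved equal on Pre_.


-- ===== PORT A =====
-- nested loops over the full brush square with a per-cell bounds test; size//2 recomputed as in the Python
def get_tiles (grid : List (List Int)) (tilex : Int) (tiley : Int) (size : Int) : List Int :=
  (PySem.List.pyRange (-(PySem.Int.floordiv size 2)) (PySem.Int.floordiv size 2 + 1) 1).foldl
    (fun brush i =>
      (PySem.List.pyRange (-(PySem.Int.floordiv size 2)) (PySem.Int.floordiv size 2 + 1) 1).foldl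
        (fun brush j =>
          if (-1 < tiley + i ∧ tiley + i < (grid.length : Int)) ∧
             (-1 < tilex + j ∧ tilex + j < ((grid.getD 0 []).length : Int)) then
            brush ++ [(grid.getD (tiley + i).toNat []).getD (tilex + j).toNat 0]
          else brush)
        brush)
    []

-- ===== PORT B =====
-- clamped window bounds, empty-window early return, then slices extended onto an accumulator
def get_tiles_alt (grid : List (List Int)) (tilex : Int) (tiley : Int) (size : Int) : List Int :=
  let half := PySem.Int.floordiv size 2
  let r0 := max 0 (tiley - half)
  let r1 := min (grid.length : Int) (tiley + half + 1)
  let c0 := max 0 (tilex - half)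
  let c1 := min (if grid = [] then 0 else ((grid.headD []).length : Int)) (tilex + half + 1)
  if r0 ≥ r1 ∨ c0 ≥ c1 then []
  else
    (PySem.List.slice grid (some r0) (some r1)).foldl
      (fun out row => out ++ PySem.List.slice row (some c0) (some c1)) []

-- ===== PRECONDITION & SPEC =====
-- Pre_ excludes exactly the ragged grids on which Python A raises IndexError: every grid cell that
-- passes A's per-cell guard (stated in A's '-1 <' style: in the brush square and inside len(grid[0]))
-- must actually exist in its own row.
def Pre_get_tiles (grid : List (List Int)) (tilex : Int) (tiley : Int) (size : Int) : Prop :=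
  ∀ ty ∈ PySem.List.pyRange 0 (grid.length : Int) 1,
    ∀ tx ∈ PySem.List.pyRange 0 ((grid.getD 0 []).length : Int) 1,
      (-1 < ty + PySem.Int.floordiv size 2 - tiley ∧ ty ≤ tiley + PySem.Int.floordiv size 2 ∧
       -1 < tx + PySem.Int.floordiv size 2 - tilex ∧ tx ≤ tilex + PySem.Int.floordiv size 2) →
        tx < ((grid.getD ty.toNat []).length : Int)
instance (grid : List (List Int)) (tilex : Int) (tiley : Int) (size : Int) : Decidable (Pre_get_tiles grid tilex tiley size) := by unfold Pre_get_tiles; infer_instance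
def pvWitness_get_tiles : List (List Int) × Int × Int × Int := ([[1, 2], [3, 4]], 1, 0, 3)

def Spec_get_tiles (grid : List (List Int)) (tilex : Int) (tiley : Int) (size : Int) (out : List Int) : Prop := out = get_tiles_alt grid tilex tiley size
instance (grid : List (List Int)) (tilex : Int) (tiley : Int) (size : Int) (out : List Int) : Decidable (Spec_get_tiles grid tilex tiley size out) := by unfold Spec_get_tiles; infer_instance

-- ===== CLAIM (what is proved, stated in full; the proofs are below) =====
def Claim_equal_get_tiles : Prop := ∀ (grid : List (List Int)) (tilex : Int) (tiley : Int) (size : Int), Dom_get_tiles grid tilex tiley size → Pre_get_tiles grid tilex tiley size → Spec_get_tiles grid tilex tiley size (get_tiles grid tilex tiley size)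

-- ===== LEMMAS AND PROOFS =====

-- filtering an integer range by an interval test is clamping the range
theorem pv_filter_pyRange_interval (a b lo hi : Int) :
    (PySem.List.pyRange a b 1).filter (fun x => decide (lo ≤ x ∧ x < hi)) =
      PySem.List.pyRange (max a lo) (min b hi) 1 := by
  by_cases hab : b ≤ a
  · rw [PySem.List.pyRange_one_eq_nil hab, PySem.List.pyRange_one_eq_nil (by omega)]
    rfl
  · have hab' : a < b := by omega
    have ih := pv_filter_pyRange_interval (a + 1) b lo hi
    rw [PySem.List.pyRange_one_cons hab', List.filter_cons]
    by_cases hx : lo ≤ a ∧ a < hi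
    · have hd : decide (lo ≤ a ∧ a < hi) = true := decide_eq_true hx
      rw [hd, if_pos rfl, ih, PySem.List.pyRange_one_cons (show max a lo < min b hi by omega)]
      have e1 : max a lo = a := by omega
      have e2 : max (a + 1) lo = a + 1 := by omega
      rw [e1, e2]
    · have hd : decide (lo ≤ a ∧ a < hi) = false := decide_eq_false hx
      rw [hd, if_neg (by simp), ih]
      by_cases hlo : a < lo
      · have e : max (a + 1) lo = max a lo := by omega
        rw [e]
      · rw [PySem.List.pyRange_one_eq_nil (show min b hi ≤ max (a + 1) lo by omega),
            PySem.List.pyRange_one_eq_nil (show min b hi ≤ max a lo by omega)]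
termination_by (b - a).toNat
decreasing_by omega

-- mapping over a shifted range is mapping over the translated range
theorem pv_map_pyRange_shift {α : Type} (a b t : Int) (g : Int → α) :
    (PySem.List.pyRange a b 1).map (fun j => g (t + j)) =
      (PySem.List.pyRange (t + a) (t + b) 1).map g := by
  rw [PySem.List.pyRange_one, PySem.List.pyRange_one,
      show t + b - (t + a) = b - a by ring, List.map_map, List.map_map]
  congr 1
  funext k
  simp only [Function.comp_apply]
  congr 1
  ring

theorem pv_flatMap_pyRange_shift {α : Type} (a b t : Int) (g : Int → List α) :
    (PySem.List.pyRange a b 1).flatMap (fun j => g (t + j)) =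
      (PySem.List.pyRange (t + a) (t + b) 1).flatMap g := by
  rw [List.flatMap_def, List.flatMap_def, pv_map_pyRange_shift]

-- a conditional flatMap body is a flatMap over the filtered list
theorem pv_flatMap_if_nil {α : Type} (l : List Int) (p : Int → Prop) [DecidablePred p]
    (g : Int → List α) :
    l.flatMap (fun x => if p x then g x else []) =
      (l.filter (fun x => decide (p x))).flatMap g := by
  induction l with
  | nil => rfl
  | cons x xs ih =>
    rw [List.flatMap_cons, List.filter_cons]
    by_cases hx : p x
    · simp [hx, ih]
    · simp [hx, ih]

-- reading a range of indices through getD is a slice, when the range lies inside the list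
theorem pv_map_pyRange_getD {α : Type} (xs : List α) (d : α) (a b : Int)
    (ha : 0 ≤ a) (hab : a ≤ b) (hb : b ≤ (xs.length : Int)) :
    (PySem.List.pyRange a b 1).map (fun i => xs.getD i.toNat d) =
      PySem.List.slice xs (some a) (some b) := by
  rw [PySem.List.slice_toNat xs ha (by omega), PySem.List.pyRange_one, List.map_map]
  apply List.ext_getElem
  · simp
    omega
  · intro i h1 h2
    simp only [List.getElem_map, List.getElem_range, Function.comp_apply,
      List.getElem_take, List.getElem_drop]
    have hlt : (a + (i : Int)).toNat < xs.length := by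
      simp at h1; omega
    rw [List.getD_eq_getElem xs d hlt]
    congr 1
    simp at h1
    omega

theorem get_tiles_eq (grid : List (List Int)) (tilex tiley size : Int)
    (hpre : Pre_get_tiles grid tilex tiley size) :
    get_tiles grid tilex tiley size = get_tiles_alt grid tilex tiley size := by
  have hW : grid.headD [] = grid.getD 0 [] := by cases grid <;> rfl
  set h : Int := PySem.Int.floordiv size 2 with hdef
  set L : Int := (grid.length : Int) with hL
  set W : Int := ((grid.getD 0 []).length : Int) with hWl
  -- the common clamped-window form
  set T : List Int :=
    (PySem.List.pyRange (max 0 (tiley - h)) (min (L - 1) (tiley + h) + 1) 1).flatMap (fun ty =>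
      (PySem.List.pyRange (max 0 (tilex - h)) (min (W - 1) (tilex + h) + 1) 1).map (fun tx =>
        (grid.getD ty.toNat []).getD tx.toNat 0)) with hT
  -- ---- step 1: A equals T (unconditionally) ----
  have hA : get_tiles grid tilex tiley size = T := by
    unfold get_tiles
    rw [PySem.List.foldl_congr_mem _ _
          (fun brush i => brush ++
            ((PySem.List.pyRange (-h) (h + 1) 1).filter (fun j =>
                decide ((-1 < tiley + i ∧ tiley + i < L) ∧
                        (-1 < tilex + j ∧ tilex + j < W)))).map (fun j =>
              (grid.getD (tiley + i).toNat []).getD (tilex + j).toNat 0)) _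
          (fun brush i _ => PySem.List.foldl_append_ite _ _ _ _),
        PySem.List.foldl_append_eq_flatMap, List.nil_append]
    have Gi : ∀ i : Int,
        ((PySem.List.pyRange (-h) (h + 1) 1).filter (fun j =>
            decide ((-1 < tiley + i ∧ tiley + i < L) ∧
                    (-1 < tilex + j ∧ tilex + j < W)))).map (fun j =>
          (grid.getD (tiley + i).toNat []).getD (tilex + j).toNat 0) =
        if -1 < tiley + i ∧ tiley + i < L then
          (PySem.List.pyRange (max 0 (tilex - h)) (min (W - 1) (tilex + h) + 1) 1).map (fun tx =>
            (grid.getD (tiley + i).toNat []).getD tx.toNat 0)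
        else [] := by
      intro i
      by_cases hP : -1 < tiley + i ∧ tiley + i < L
      · rw [if_pos hP,
            List.filter_congr (q := fun j => decide (-tilex ≤ j ∧ j < W - tilex))
              (fun j _ => decide_eq_decide.mpr (by omega)),
            pv_filter_pyRange_interval,
            pv_map_pyRange_shift _ _ tilex (fun tx => (grid.getD (tiley + i).toNat []).getD tx.toNat 0),
            show tilex + max (-h) (-tilex) = max 0 (tilex - h) by omega,
            show tilex + min (h + 1) (W - tilex) = min (W - 1) (tilex + h) + 1 by omega]
      · rw [if_neg hP,
            List.filter_eq_nil_iff.mpr (fun j _ hj => hP (of_decide_eq_true hj).1)]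
        rfl
    rw [funext Gi,
        pv_flatMap_if_nil _ (fun i => -1 < tiley + i ∧ tiley + i < L),
        List.filter_congr (q := fun i => decide (-tiley ≤ i ∧ i < L - tiley))
          (fun i _ => decide_eq_decide.mpr (by omega)),
        pv_filter_pyRange_interval,
        pv_flatMap_pyRange_shift _ _ tiley (fun ty =>
          (PySem.List.pyRange (max 0 (tilex - h)) (min (W - 1) (tilex + h) + 1) 1).map (fun tx =>
            (grid.getD ty.toNat []).getD tx.toNat 0)),
        show tiley + max (-h) (-tiley) = max 0 (tiley - h) by omega,
        show tiley + min (h + 1) (L - tiley) = min (L - 1) (tiley + h) + 1 by omega]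
  -- ---- step 2: T equals B (under Pre_) ----
  have hB : T = get_tiles_alt grid tilex tiley size := by
    unfold get_tiles_alt
    simp only [← hdef]
    set r0 : Int := max 0 (tiley - h) with hr0
    set c0 : Int := max 0 (tilex - h) with hc0
    have hWif : (if grid = [] then (0 : Int) else ((grid.headD []).length : Int)) = W := by
      by_cases hg : grid = []
      · subst hg; simp [hWl]
      · rw [if_neg hg, hW]
    rw [hWif]
    have hr1 : min (L - 1) (tiley + h) + 1 = min L (tiley + h + 1) := by omega
    have hc1 : min (W - 1) (tilex + h) + 1 = min W (tilex + h + 1) := by omega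
    set r1 : Int := min L (tiley + h + 1) with hr1d
    set c1 : Int := min W (tilex + h + 1) with hc1d
    rw [hT, hr1, hc1]
    by_cases hempty : r0 ≥ r1 ∨ c0 ≥ c1
    · rw [if_pos hempty]
      rcases hempty with hrow | hcol
      · rw [PySem.List.pyRange_one_eq_nil hrow]; rfl
      · rw [PySem.List.pyRange_one_eq_nil hcol]
        simp
    · rw [if_neg hempty]
      rw [not_or] at hempty
      simp only [not_le] at hempty
      obtain ⟨hrlt, hclt⟩ := hempty
      rw [PySem.List.foldl_append_eq_flatMap, List.nil_append]
      -- each in-window row is at least c1 long, by Pre_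
      have hrowlen : ∀ ty ∈ PySem.List.pyRange r0 r1 1,
          c1 ≤ ((grid.getD ty.toNat []).length : Int) := by
        intro ty hty
        rw [PySem.List.mem_pyRange_one] at hty
        have := hpre ty (by rw [PySem.List.mem_pyRange_one]; omega)
          (c1 - 1) (by rw [PySem.List.mem_pyRange_one]; omega)
          ⟨by omega, by omega, by omega, by omega⟩
        omega
      -- inner map is the row slice, row by row
      have hinner : ∀ ty ∈ PySem.List.pyRange r0 r1 1,
          (PySem.List.pyRange c0 c1 1).map (fun tx => (grid.getD ty.toNat []).getD tx.toNat 0) =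
            PySem.List.slice (grid.getD ty.toNat []) (some c0) (some c1) := by
        intro ty hty
        exact pv_map_pyRange_getD _ 0 c0 c1 (by omega) (by omega) (hrowlen ty hty)
      rw [List.flatMap_congr hinner]
      -- outer range through getD is the grid slice
      have houter : (PySem.List.pyRange r0 r1 1).map (fun ty => grid.getD ty.toNat []) =
          PySem.List.slice grid (some r0) (some r1) :=
        pv_map_pyRange_getD grid [] r0 r1 (by omega) (by omega) (by omega)
      rw [← houter, List.flatMap_def, List.flatMap_def, List.map_map]
      rfl
  rw [hA, hB]

-- ===== VERDICT (by name: the statement is the Claim_ definition above) =====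
theorem get_tiles_spec : Claim_equal_get_tiles := by
  intro grid tilex tiley size _ hpre
  unfold Spec_get_tiles
  exact get_tiles_eq grid tilex tiley size hpre
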